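-- pv_equiv track=rewrite | github.com/deanbrigham/testing | testing.py | is_meta
-- ===== SOURCE A (Python) =====
-- def is_meta(w1, w2):
--     clist=[]
--     ilist=[]
--     count=0
--     for i in range(len(w1)):
--         if not w1[i]==w2[i]:
--             count+=1
--             ilist.append(i)
--             clist.append(w1[i])
--     if count==2:
--         nw=w1[:ilist[0]]+clist[1]+w1[ilist[0]+1:ilist[1]]+clist[0]+w1[ilist[1]+1:]
--         if nw==w2:
--             return True
--     return False
-- ===== SOURCE B (Python) =====
-- def is_meta(w1, w2):
--     diffs = 0
--     for i in range(len(w1)):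
--         if w1[i] != w2[i]:
--             diffs += 1
--     return diffs == 2 and sorted(w1) == sorted(w2)
-- ===== Notes on version B (the rewrite author's own statement) =====
-- stated objective: idiomatic
-- what changed: B only counts the differing positions in a plain counter and verifies the swap by multiset (sorted) equality of the two words, instead of A's accumulation of the differing indices/characters into lists and reconstruction of the swapped string by slicing/concatenation.
import Mathlib
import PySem

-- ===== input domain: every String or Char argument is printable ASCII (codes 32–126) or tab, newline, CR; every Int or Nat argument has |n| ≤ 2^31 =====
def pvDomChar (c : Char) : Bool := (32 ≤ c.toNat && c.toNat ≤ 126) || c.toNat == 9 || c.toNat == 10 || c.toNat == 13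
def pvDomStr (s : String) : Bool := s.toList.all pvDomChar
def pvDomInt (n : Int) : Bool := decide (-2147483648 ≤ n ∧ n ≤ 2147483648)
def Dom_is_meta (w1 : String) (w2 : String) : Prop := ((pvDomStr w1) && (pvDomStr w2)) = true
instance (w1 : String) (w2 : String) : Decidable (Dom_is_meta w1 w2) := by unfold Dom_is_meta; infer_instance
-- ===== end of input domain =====

-- B verifies the "one swap" by counting differing positions and comparing sorted() multisets,
-- instead of A's reconstruction of the swapped string by slicing; objective: idiomatic.


-- ===== PORT A =====
-- one step of A's loop body; state = (clist, ilist, count); none = IndexError already raised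
def aStep (l1 l2 : List Char) (st : Option (List Char × List Int × Int)) (i : Int) :
    Option (List Char × List Int × Int) :=
  match st with
  | none => none
  | some (clist, ilist, count) =>
    match PySem.List.pyGet? l1 i, PySem.List.pyGet? l2 i with
    | some c1, some c2 =>
        if !(c1 == c2) then some (clist ++ [c1], ilist ++ [i], count + 1)
        else some (clist, ilist, count)
    | _, _ => none   -- w2[i] IndexError (excluded by Pre_)

-- 'for i in range(len(w1)): if not w1[i]==w2[i]: count+=1; ilist.append(i); clist.append(w1[i])'
def aLoop (l1 l2 : List Char) : Option (List Char × List Int × Int) :=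
  (PySem.List.pyRange 0 (l1.length : Int)).foldl (aStep l1 l2) (some ([], [], 0))

def is_meta (w1 : String) (w2 : String) : Bool :=
  match aLoop w1.toList w2.toList with
  | none => false   -- IndexError; excluded by Pre_
  | some (clist, ilist, count) =>
    if count == 2 then
      match PySem.List.pyGet? ilist 0, PySem.List.pyGet? ilist 1,
            PySem.List.pyGet? clist 0, PySem.List.pyGet? clist 1 with
      | some i0, some i1, some c0, some c1 =>
        -- nw = w1[:ilist[0]] + clist[1] + w1[ilist[0]+1:ilist[1]] + clist[0] + w1[ilist[1]+1:]
        let nw := PySem.List.slice w1.toList none (some i0) ++ [c1] ++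
                  PySem.List.slice w1.toList (some (i0 + 1)) (some i1) ++ [c0] ++
                  PySem.List.slice w1.toList (some (i1 + 1)) none
        decide (nw = w2.toList)   -- 'if nw==w2: return True' … 'return False'
      | _, _, _, _ => false   -- unreachable when count == 2
    else false

-- ===== PORT B =====
-- 'for i in range(len(w1)): if w1[i] != w2[i]: diffs += 1'; none = IndexError
def bLoop (l1 l2 : List Char) : Option Int :=
  (PySem.List.pyRange 0 (l1.length : Int)).foldl
    (fun st i =>
      match st with
      | none => none
      | some d =>
        match PySem.List.pyGet? l1 i, PySem.List.pyGet? l2 i with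
        | some c1, some c2 => some (if c1 != c2 then d + 1 else d)
        | _, _ => none)
    (some 0)

def is_meta_alt (w1 : String) (w2 : String) : Bool :=
  match bLoop w1.toList w2.toList with
  | none => false   -- IndexError; excluded by Pre_
  | some diffs =>
      -- 'return diffs == 2 and sorted(w1) == sorted(w2)'
      (diffs == 2) &&
        decide (PySem.List.sorted w1.toList (fun x => x) false =
                PySem.List.sorted w2.toList (fun x => x) false)

-- ===== PRECONDITION & SPEC =====
-- Pre_ excludes exactly the inputs where len(w2) < len(w1): there both A and B raise IndexError at w2[i].
def Pre_is_meta (w1 : String) (w2 : String) : Prop := PySem.Str.len w1 ≤ PySem.Str.len w2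
instance (w1 : String) (w2 : String) : Decidable (Pre_is_meta w1 w2) := by unfold Pre_is_meta; infer_instance
def pvWitness_is_meta : String × String := ("abcd", "acbd")

def Spec_is_meta (w1 : String) (w2 : String) (out : Bool) : Prop := out = is_meta_alt w1 w2
instance (w1 : String) (w2 : String) (out : Bool) : Decidable (Spec_is_meta w1 w2 out) := by unfold Spec_is_meta; infer_instance

-- ===== CLAIM (what is proved, stated in full; the proofs are below) =====
def Claim_equal_is_meta : Prop := ∀ (w1 : String) (w2 : String), Dom_is_meta w1 w2 → Pre_is_meta w1 w2 → Spec_is_meta w1 w2 (is_meta w1 w2)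

-- ===== LEMMAS AND PROOFS =====

-- the positions < m at which the two words differ (proof-side characterisation of both loops)
def pvDiffIdx (l1 l2 : List Char) (m : Nat) : List Nat :=
  (List.range m).filter (fun k => decide (l1.getD k ' ' ≠ l2.getD k ' '))

theorem pvDiffIdx_succ (l1 l2 : List Char) (m : Nat) :
    pvDiffIdx l1 l2 (m + 1) =
      pvDiffIdx l1 l2 m ++ (if l1.getD m ' ' ≠ l2.getD m ' ' then [m] else []) := by
  simp [pvDiffIdx, List.range_succ, List.filter_append]
  split_ifs with h <;> simp [h]

theorem aLoop_spec (l1 l2 : List Char) (h : l1.length ≤ l2.length) (m : Nat) (hm : m ≤ l1.length) :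
    ((List.range m).map (fun (k : Nat) => (k : Int))).foldl (aStep l1 l2) (some ([], [], 0)) =
      some ((pvDiffIdx l1 l2 m).map (fun k => l1.getD k ' '),
            (pvDiffIdx l1 l2 m).map (fun (k : Nat) => (k : Int)),
            ((pvDiffIdx l1 l2 m).length : Int)) := by
  induction m with
  | zero => simp [pvDiffIdx]
  | succ m ih =>
    have hml1 : m < l1.length := by omega
    have hml2 : m < l2.length := by omega
    rw [List.range_succ, List.map_append, List.foldl_append, ih (by omega)]
    rw [pvDiffIdx_succ]
    simp only [List.map_cons, List.map_nil, List.foldl_cons, List.foldl_nil, aStep]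
    rw [PySem.List.pyGet?_natCast, PySem.List.pyGet?_natCast,
        List.getElem?_eq_getElem hml1, List.getElem?_eq_getElem hml2]
    by_cases hc : l1[m] = l2[m] <;>
      simp [hc, List.getElem?_eq_getElem hml1, List.getElem?_eq_getElem hml2]

theorem bLoop_spec (l1 l2 : List Char) (h : l1.length ≤ l2.length) (m : Nat) (hm : m ≤ l1.length) :
    ((List.range m).map (fun (k : Nat) => (k : Int))).foldl
      (fun st i =>
        match st with
        | none => none
        | some d =>
          match PySem.List.pyGet? l1 i, PySem.List.pyGet? l2 i with
          | some c1, some c2 => some (if c1 != c2 then d + 1 else d)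
          | _, _ => none)
      (some (0:Int)) = some (((pvDiffIdx l1 l2 m).length : Int)) := by
  induction m with
  | zero => simp [pvDiffIdx]
  | succ m ih =>
    have hml1 : m < l1.length := by omega
    have hml2 : m < l2.length := by omega
    rw [List.range_succ, List.map_append, List.foldl_append, ih (by omega)]
    rw [pvDiffIdx_succ]
    simp only [List.map_cons, List.map_nil, List.foldl_cons, List.foldl_nil]
    rw [PySem.List.pyGet?_natCast, PySem.List.pyGet?_natCast,
        List.getElem?_eq_getElem hml1, List.getElem?_eq_getElem hml2]
    by_cases hc : l1[m] = l2[m] <;>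
      simp [hc, List.getElem?_eq_getElem hml1, List.getElem?_eq_getElem hml2]

-- decomposition of a list at two positions i < j < length
theorem two_split (l : List Char) (i j : Nat) (hij : i < j) (hj : j < l.length) :
    l = l.take i ++ l.getD i ' ' ::
        ((l.drop (i+1)).take (j - (i+1)) ++ l.getD j ' ' :: l.drop (j+1)) := by
  have hi : i < l.length := by omega
  rw [List.getD_eq_getElem _ _ hi, List.getD_eq_getElem _ _ hj]
  conv_lhs => rw [← List.take_append_drop i l, List.drop_eq_getElem_cons hi]
  congr 1
  congr 1
  conv_lhs => rw [← List.take_append_drop (j - (i+1)) (l.drop (i+1))]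
  congr 1
  rw [List.drop_drop]
  have hjj : i + 1 + (j - (i+1)) = j := by omega
  rw [hjj, List.drop_eq_getElem_cons hj]

theorem swap_perm (P M S : List Char) (x y : Char) :
    (P ++ x :: (M ++ y :: S)).Perm (P ++ y :: (M ++ x :: S)) := by
  refine List.Perm.append_left P ?_
  exact (List.perm_middle.cons x).trans
    ((List.Perm.swap y x (M ++ S)).trans (List.perm_middle.symm.cons y))

-- the heart: with exactly two differing positions i < j, "swapped w1 equals w2" ↔ "w1 and w2 are anagrams"
theorem swap_iff_perm (l1 l2 : List Char) (h : l1.length ≤ l2.length) (i j : Nat)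
    (hij : i < j) (hj : j < l1.length)
    (hi' : l1.getD i ' ' ≠ l2.getD i ' ')
    (hout : ∀ k, k < l1.length → k ≠ i → k ≠ j → l1.getD k ' ' = l2.getD k ' ') :
    (l1.take i ++ [l1.getD j ' '] ++ (l1.drop (i+1)).take (j - (i+1)) ++ [l1.getD i ' '] ++
        l1.drop (j+1) = l2) ↔ l1.Perm l2 := by
  have hi : i < l1.length := by omega
  have hi2 : i < l2.length := by omega
  have hj2 : j < l2.length := by omega
  rw [List.getD_eq_getElem _ _ hi, List.getD_eq_getElem _ _ hj]
  rw [List.getD_eq_getElem _ _ hi, List.getD_eq_getElem _ _ hi2] at hi'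
  have hout' : ∀ (k : Nat) (hk1 : k < l1.length) (hk2 : k < l2.length),
      k ≠ i → k ≠ j → l1[k] = l2[k] := by
    intro k hk1 hk2 h1 h2
    have h3 := hout k hk1 h1 h2
    rwa [List.getD_eq_getElem _ _ hk1, List.getD_eq_getElem _ _ hk2] at h3
  have hsplit1 : l1 = l1.take i ++ l1[i] ::
      ((l1.drop (i+1)).take (j - (i+1)) ++ l1[j] :: l1.drop (j+1)) := by
    have h4 := two_split l1 i j hij hj
    rwa [List.getD_eq_getElem _ _ hi, List.getD_eq_getElem _ _ hj] at h4
  constructor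
  · intro hnw
    have hl2 : l2 = l1.take i ++ l1[j] ::
        ((l1.drop (i+1)).take (j - (i+1)) ++ l1[i] :: l1.drop (j+1)) := by
      rw [← hnw]; simp
    rw [hl2]
    conv_lhs => rw [hsplit1]
    exact swap_perm _ _ _ _ _
  · intro hperm
    have hlen2 : l2.length = l1.length := hperm.length_eq.symm
    have hsplit2 : l2 = l2.take i ++ l2[i] ::
        ((l2.drop (i+1)).take (j - (i+1)) ++ l2[j] :: l2.drop (j+1)) := by
      have h4 := two_split l2 i j hij hj2
      rwa [List.getD_eq_getElem _ _ hi2, List.getD_eq_getElem _ _ hj2] at h4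
    have hP : l2.take i = l1.take i := by
      apply List.ext_getElem (by simp; omega)
      intro k hk1 hk2
      have hk : k < i := by simp at hk1; omega
      simp only [List.getElem_take]
      exact (hout' k (by omega) (by omega) (by omega) (by omega)).symm
    have hM : (l2.drop (i+1)).take (j - (i+1)) = (l1.drop (i+1)).take (j - (i+1)) := by
      apply List.ext_getElem (by simp; omega)
      intro k hk1 hk2
      have hk : k < j - (i+1) := by simp at hk1; omega
      simp only [List.getElem_take, List.getElem_drop]
      exact (hout' (i+1+k) (by omega) (by omega) (by omega) (by omega)).symm
    have hS : l2.drop (j+1) = l1.drop (j+1) := by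
      apply List.ext_getElem (by simp; omega)
      intro k hk1 hk2
      have hk5 : j + 1 + k < l1.length := by simp at hk2; omega
      have hk6 : j + 1 + k < l2.length := by simp at hk1; omega
      simp only [List.getElem_drop]
      exact (hout' (j+1+k) (by omega) (by omega) (by omega) (by omega)).symm
    have hperm' : (l1[i] :: ((l1.drop (i+1)).take (j - (i+1)) ++ l1[j] :: l1.drop (j+1))).Perm
        (l2[i] :: ((l1.drop (i+1)).take (j - (i+1)) ++ l2[j] :: l1.drop (j+1))) := by
      have h6 := hperm
      conv at h6 => lhs; rw [hsplit1]
      conv at h6 => rhs; rw [hsplit2, hP, hM, hS]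
      exact (List.perm_append_left_iff _).mp h6
    have hms : l1[i] ::ₘ l1[j] ::ₘ
          (((l1.drop (i+1)).take (j - (i+1)) : Multiset Char) + (l1.drop (j+1) : Multiset Char)) =
        l2[i] ::ₘ l2[j] ::ₘ
          (((l1.drop (i+1)).take (j - (i+1)) : Multiset Char) + (l1.drop (j+1) : Multiset Char)) := by
      have h7 := Multiset.coe_eq_coe.mpr hperm'
      simp only [← Multiset.cons_coe, ← Multiset.coe_add, Multiset.add_cons] at h7
      exact h7
    have hpair : ({l1[i], l1[j]} : Multiset Char) = {l2[i], l2[j]} := by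
      apply add_right_cancel (b := ((l1.drop (i+1)).take (j - (i+1)) : Multiset Char) +
        (l1.drop (j+1) : Multiset Char))
      simpa [Multiset.insert_eq_cons, Multiset.cons_add] using hms
    have hab : l1[i] = l2[j] := by
      have hmem : l1[i] ∈ ({l2[i], l2[j]} : Multiset Char) := by
        rw [← hpair]; simp
      simp only [Multiset.insert_eq_cons, Multiset.mem_cons, Multiset.mem_singleton] at hmem
      tauto
    have hba : l1[j] = l2[i] := by
      rw [← hab] at hpair
      rcases Multiset.cons_eq_cons.mp (by
          simpa [Multiset.insert_eq_cons] using hpair) with ⟨h8, _⟩ | ⟨h8, cs, hcs1, hcs2⟩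
      · exact absurd h8 hi'
      · have hcs0 : cs = 0 := by
          have h9 := congrArg Multiset.card hcs2
          simp at h9
          exact h9
        rw [hcs0] at hcs1
        simpa using hcs1
    rw [hsplit2, hP, hM, hS, ← hab, ← hba]
    simp

-- ===== VERDICT (by name: the statement is the Claim_ definition above) =====
theorem is_meta_spec : Claim_equal_is_meta := by
  intro w1 w2 _ hpre
  unfold Spec_is_meta
  have hlen : w1.toList.length ≤ w2.toList.length := by
    unfold Pre_is_meta at hpre
    rw [PySem.Str.len_eq, PySem.Str.len_eq] at hpre
    exact_mod_cast hpre
  set l1 := w1.toList with hl1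
  set l2 := w2.toList with hl2
  have hA : aLoop l1 l2 = some ((pvDiffIdx l1 l2 l1.length).map (fun k => l1.getD k ' '),
      (pvDiffIdx l1 l2 l1.length).map (fun (k : Nat) => (k : Int)),
      ((pvDiffIdx l1 l2 l1.length).length : Int)) := by
    unfold aLoop
    rw [PySem.List.pyRange_zero_nat]
    exact aLoop_spec l1 l2 hlen l1.length le_rfl
  have hB : bLoop l1 l2 = some ((pvDiffIdx l1 l2 l1.length).length : Int) := by
    unfold bLoop
    rw [PySem.List.pyRange_zero_nat]
    exact bLoop_spec l1 l2 hlen l1.length le_rfl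
  show is_meta w1 w2 = is_meta_alt w1 w2
  unfold is_meta is_meta_alt
  rw [← hl1, ← hl2, hA, hB]
  set D := pvDiffIdx l1 l2 l1.length with hDdef
  by_cases h2 : D.length = 2
  · obtain ⟨i, j, hD⟩ := List.length_eq_two.mp h2
    have hpw : List.Pairwise (· < ·) D := by
      rw [hDdef]
      exact List.Pairwise.filter _ (List.pairwise_lt_range)
    have hij : i < j := by
      rw [hD] at hpw; simp at hpw; exact hpw
    have hi : i < l1.length ∧ l1.getD i ' ' ≠ l2.getD i ' ' := by
      have h5 : i ∈ D := by rw [hD]; simp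
      rw [hDdef] at h5
      simp [pvDiffIdx, List.mem_filter, List.mem_range] at h5
      exact h5
    have hj : j < l1.length ∧ l1.getD j ' ' ≠ l2.getD j ' ' := by
      have h5 : j ∈ D := by rw [hD]; simp
      rw [hDdef] at h5
      simp [pvDiffIdx, List.mem_filter, List.mem_range] at h5
      exact h5
    have hout : ∀ k, k < l1.length → k ≠ i → k ≠ j → l1.getD k ' ' = l2.getD k ' ' := by
      intro k hk hki hkj
      by_contra hne
      have h5 : k ∈ D := by
        rw [hDdef]
        simp only [pvDiffIdx, List.mem_filter, List.mem_range, decide_eq_true_eq]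
        exact ⟨hk, hne⟩
      rw [hD] at h5; simp at h5; tauto
    rw [hD]
    simp only [List.map_cons, List.map_nil, List.length_cons, List.length_nil]
    have hget0i : PySem.List.pyGet? [(i : Int), (j : Int)] 0 = some (i : Int) := rfl
    have hget1i : PySem.List.pyGet? [(i : Int), (j : Int)] 1 = some (j : Int) := rfl
    have hget0c : PySem.List.pyGet? [l1.getD i ' ', l1.getD j ' '] 0 = some (l1.getD i ' ') := rfl
    have hget1c : PySem.List.pyGet? [l1.getD i ' ', l1.getD j ' '] 1 = some (l1.getD j ' ') := rfl
    rw [show ((0 + 1 + 1 : Nat) : Int) = ((2 : Nat) : Int) by norm_num]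
    simp only [hget0i, hget1i, hget0c, hget1c]
    have s1 : PySem.List.slice l1 none (some (i : Int)) = l1.take i :=
      PySem.List.slice_to_natCast l1 i
    have s2 : PySem.List.slice l1 (some ((i : Int) + 1)) (some (j : Int)) =
        (l1.drop (i+1)).take (j - (i+1)) := by
      rw [show ((i : Int) + 1) = (((i+1 : Nat)) : Int) by push_cast; ring]
      exact PySem.List.slice_natCast l1 (i+1) j
    have s3 : PySem.List.slice l1 (some ((j : Int) + 1)) none = l1.drop (j+1) := by
      rw [show ((j : Int) + 1) = (((j+1 : Nat)) : Int) by push_cast; ring]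
      exact PySem.List.slice_from_natCast l1 (j+1)
    simp only [s1, s2, s3]
    have hbeq : (((2 : Nat) : Int) == 2) = true := by decide
    simp only [hbeq, if_pos, Bool.true_and]
    rw [decide_eq_decide, PySem.List.sorted_id_eq_sorted_id_iff_perm]
    exact swap_iff_perm l1 l2 hlen i j hij hj.1 hi.2 hout
  · have hbeq : (((D.length : Nat) : Int) == 2) = false := by
      simp only [beq_eq_false_iff_ne, ne_eq]
      intro hc
      exact h2 (by exact_mod_cast hc)
    simp only [hbeq, Bool.false_and, if_neg, Bool.false_eq_true, not_false_eq_true]
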